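-- pv_equiv track=rewrite | github.com/HarshithReddy01/redos-analyzer | scan_pypi.py | _classify_context_type
-- ===== SOURCE A (Python) =====
-- def _path_segments(path: str) -> list[str]:
--     return path.replace('\\', '/').split('/')
--
-- def _classify_context_type(path: str) -> str:
--     segs = _path_segments(path)
--     seg_lower = [s.lower() for s in segs]
--     if any(s in ('tests', 'test', 'unittests') for s in seg_lower):
--         return 'test'
--     if any(s in ('vendor', 'vendored') or s.startswith('vendor') for s in seg_lower):
--         return 'vendored'
--     if any(s in ('docs', 'doc', 'examples', 'example') for s in seg_lower):
--         return 'tooling'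
--     return 'runtime'
-- ===== SOURCE B (Python) =====
-- def _classify_context_type(path: str) -> str:
--     labels = set()
--     for seg in path.replace('\\', '/').split('/'):
--         s = seg.lower()
--         if s in ('tests', 'test', 'unittests'):
--             labels.add('test')
--         elif s.startswith('vendor'):
--             labels.add('vendored')
--         elif s in ('docs', 'doc', 'examples', 'example'):
--             labels.add('tooling')
--     for label in ('test', 'vendored', 'tooling'):
--         if label in labels:
--             return label
--     return 'runtime'
-- ===== Notes on version B (the rewrite author's own statement) =====
-- stated objective: alternative
-- what changed: Replaces A's three separate short-circuit any-scans over the segment list by a single pass that records each segment's category in a set, followed by a fixed priority lookup (test > vendored > tooling > runtime).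
import Mathlib
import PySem

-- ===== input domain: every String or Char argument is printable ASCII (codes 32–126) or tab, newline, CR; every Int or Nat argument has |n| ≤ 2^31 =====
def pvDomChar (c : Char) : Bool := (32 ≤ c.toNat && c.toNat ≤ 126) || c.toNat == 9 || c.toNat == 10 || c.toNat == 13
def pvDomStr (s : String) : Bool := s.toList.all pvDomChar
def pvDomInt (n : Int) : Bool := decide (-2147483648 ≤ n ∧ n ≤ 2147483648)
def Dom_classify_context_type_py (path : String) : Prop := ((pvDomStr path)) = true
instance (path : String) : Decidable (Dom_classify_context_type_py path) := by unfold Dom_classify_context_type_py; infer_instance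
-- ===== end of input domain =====

-- B replaces A's three short-circuit scans by one pass that records the category of each
-- segment in a set, then returns the highest-priority category seen (objective: alternative).

-- ===== PORT A =====
def pathSegments (path : String) : List String :=
  (PySem.Str.split? (PySem.Str.replace path "\\" "/") "/").getD []

def classify_context_type_py (path : String) : String :=
  let segs := pathSegments path
  let segLower := segs.map PySem.Str.lower
  if segLower.any (fun s => s == "tests" || s == "test" || s == "unittests") then "test"
  else if segLower.any (fun s => (s == "vendor" || s == "vendored") || PySem.Str.startswith s "vendor") then "vendored"
  else if segLower.any (fun s => s == "docs" || s == "doc" || s == "examples" || s == "example") then "tooling"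
  else "runtime"

-- ===== PORT B =====
def pvLabel (s : String) : Option String :=
  if s == "tests" || s == "test" || s == "unittests" then some "test"
  else if PySem.Str.startswith s "vendor" then some "vendored"
  else if s == "docs" || s == "doc" || s == "examples" || s == "example" then some "tooling"
  else none

def pvStep (acc : PySem.Set String) (seg : String) : PySem.Set String :=
  match pvLabel (PySem.Str.lower seg) with
  | some l => PySem.Set.add acc l
  | none => acc

def classify_context_type_py_alt (path : String) : String :=
  let labels : PySem.Set String :=
    ((PySem.Str.split? (PySem.Str.replace path "\\" "/") "/").getD []).foldl pvStep PySem.Set.empty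
  if PySem.Set.contains labels "test" then "test"
  else if PySem.Set.contains labels "vendored" then "vendored"
  else if PySem.Set.contains labels "tooling" then "tooling"
  else "runtime"

-- ===== PRECONDITION & SPEC =====
def Spec_classify_context_type_py (path : String) (out : String) : Prop := out = classify_context_type_py_alt path
instance (path : String) (out : String) : Decidable (Spec_classify_context_type_py path out) := by unfold Spec_classify_context_type_py; infer_instance

-- ===== CLAIM (what is proved, stated in full; the proofs are below) =====
def Claim_equal_classify_context_type_py : Prop := ∀ (path : String), Dom_classify_context_type_py path → Spec_classify_context_type_py path (classify_context_type_py path)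

-- ===== LEMMAS AND PROOFS =====

theorem pvContains_iff (s : PySem.Set String) (x : String) : PySem.Set.contains s x = true ↔ x ∈ s := by
  simp [PySem.Set.contains]

-- membership in B's accumulated label set
theorem mem_fold_pvStep (l : List String) (acc : PySem.Set String) (x : String) :
    (x ∈ l.foldl pvStep acc) ↔ (x ∈ acc ∨ ∃ s ∈ l, pvLabel (PySem.Str.lower s) = some x) := by
  induction l generalizing acc with
  | nil => simp
  | cons hd tl ih =>
    simp only [List.foldl_cons, ih, List.mem_cons]
    unfold pvStep
    cases h : pvLabel (PySem.Str.lower hd) with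
    | none =>
      constructor
      · rintro (ha | ⟨s, hs, hl⟩)
        · exact Or.inl ha
        · exact Or.inr ⟨s, Or.inr hs, hl⟩
      · rintro (ha | ⟨s, hs | hs, hl⟩)
        · exact Or.inl ha
        · subst hs; rw [h] at hl; cases hl
        · exact Or.inr ⟨s, hs, hl⟩
    | some lab =>
      simp only [PySem.Set.mem_add]
      constructor
      · rintro ((ha | hx) | ⟨s, hs, hl⟩)
        · exact Or.inl ha
        · exact Or.inr ⟨hd, Or.inl rfl, by rw [h, hx]⟩
        · exact Or.inr ⟨s, Or.inr hs, hl⟩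
      · rintro (ha | ⟨s, hs | hs, hl⟩)
        · exact Or.inl (Or.inl ha)
        · subst hs; rw [h] at hl; exact Or.inl (Or.inr (Option.some_inj.mp hl).symm)
        · exact Or.inr ⟨s, hs, hl⟩

theorem classify_context_type_py_spec : Claim_equal_classify_context_type_py := by
  intro path _
  unfold Spec_classify_context_type_py classify_context_type_py classify_context_type_py_alt pathSegments
  set segs := (PySem.Str.split? (PySem.Str.replace path "\\" "/") "/").getD [] with hsegs
  simp only [pvContains_iff, mem_fold_pvStep, PySem.Set.empty]
  simp only [List.not_mem_nil, false_or, List.any_map, List.any_eq_true, Function.comp]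
  have e1 : (∃ s ∈ segs, pvLabel (PySem.Str.lower s) = some "test") ↔
      (∃ s ∈ segs, ((PySem.Str.lower s == "tests" || PySem.Str.lower s == "test" ||
        PySem.Str.lower s == "unittests") = true)) := by
    constructor
    · rintro ⟨s, hs, hl⟩
      refine ⟨s, hs, ?_⟩
      unfold pvLabel at hl
      split_ifs at hl with p1 p2 p3 <;> simp_all
    · rintro ⟨s, hs, hp⟩
      refine ⟨s, hs, ?_⟩
      unfold pvLabel
      rw [if_pos hp]
  simp only [e1]
  by_cases h1 : ∃ s ∈ segs, ((PySem.Str.lower s == "tests" || PySem.Str.lower s == "test" ||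
      PySem.Str.lower s == "unittests") = true)
  · rw [if_pos h1, if_pos h1]
  · rw [if_neg h1, if_neg h1]
    have e2 : (∃ s ∈ segs, pvLabel (PySem.Str.lower s) = some "vendored") ↔
        (∃ s ∈ segs, (((PySem.Str.lower s == "vendor" || PySem.Str.lower s == "vendored") ||
          PySem.Str.startswith (PySem.Str.lower s) "vendor") = true)) := by
      constructor
      · rintro ⟨s, hs, hl⟩
        refine ⟨s, hs, ?_⟩
        unfold pvLabel at hl
        split_ifs at hl with p1 p2 p3
        · simp_all
        · simp only [Bool.or_eq_true]
          exact Or.inr p2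
        · simp_all
      · rintro ⟨s, hs, hp⟩
        refine ⟨s, hs, ?_⟩
        have hnt : ¬ ((PySem.Str.lower s == "tests" || PySem.Str.lower s == "test" ||
            PySem.Str.lower s == "unittests") = true) := fun hc => h1 ⟨s, hs, hc⟩
        have hv : PySem.Str.startswith (PySem.Str.lower s) "vendor" = true := by
          rcases Bool.or_eq_true_iff.mp hp with hp' | hp'
          · rcases Bool.or_eq_true_iff.mp hp' with hp'' | hp''
            · rw [eq_of_beq hp'']; decide
            · rw [eq_of_beq hp'']; decide
          · exact hp'
        unfold pvLabel
        rw [if_neg hnt, if_pos hv]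
    simp only [e2]
    by_cases h2 : ∃ s ∈ segs, (((PySem.Str.lower s == "vendor" || PySem.Str.lower s == "vendored") ||
        PySem.Str.startswith (PySem.Str.lower s) "vendor") = true)
    · rw [if_pos h2, if_pos h2]
    · rw [if_neg h2, if_neg h2]
      have e3 : (∃ s ∈ segs, pvLabel (PySem.Str.lower s) = some "tooling") ↔
          (∃ s ∈ segs, ((PySem.Str.lower s == "docs" || PySem.Str.lower s == "doc" ||
            PySem.Str.lower s == "examples" || PySem.Str.lower s == "example") = true)) := by
        constructor
        · rintro ⟨s, hs, hl⟩
          refine ⟨s, hs, ?_⟩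
          unfold pvLabel at hl
          split_ifs at hl with p1 p2 p3 <;> simp_all
        · rintro ⟨s, hs, hp⟩
          refine ⟨s, hs, ?_⟩
          have hnt : ¬ ((PySem.Str.lower s == "tests" || PySem.Str.lower s == "test" ||
              PySem.Str.lower s == "unittests") = true) := fun hc => h1 ⟨s, hs, hc⟩
          have hnv : ¬ (PySem.Str.startswith (PySem.Str.lower s) "vendor" = true) := by
            intro hc; exact h2 ⟨s, hs, by simp only [Bool.or_eq_true]; exact Or.inr hc⟩
          unfold pvLabel
          rw [if_neg hnt, if_neg hnv, if_pos hp]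
      simp only [e3]
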